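-- pv_equiv track=rewrite | github.com/Windyy-1007/ura-hungvuong | src/classifiers/train_all_models.py | get_target_categories
-- ===== SOURCE A (Python) =====
-- def get_target_categories(target_list):
--     """
--     Categorize targets into different medical categories.
--
--     Parameters:
--     target_list (list): List of target column names
--
--     Returns:
--     dict: Categorized targets
--     """
--     categories = {
--         'CTG_Assessment': [],
--         'Patient_Condition': [],
--         'Labor_Progress': [],
--         'Monitoring': [],
--         'Resuscitation': [],
--         'Delivery_Prep': [],
--         'Complications': [],
--         'Composite': []
--     }
--
--     for target in target_list:
--         if 'CTG' in target:
--             categories['CTG_Assessment'].append(target)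
--         elif any(word in target for word in ['Patient', 'Stable', 'Pain', 'Fever']):
--             categories['Patient_Condition'].append(target)
--         elif any(word in target for word in ['Contractions', 'Guidance', 'Multipara', 'Position']):
--             categories['Labor_Progress'].append(target)
--         elif any(word in target for word in ['Monitor', 'Report', 'Notify', 'Reassess']):
--             categories['Monitoring'].append(target)
--         elif 'Resuscitation' in target:
--             categories['Resuscitation'].append(target)
--         elif any(word in target for word in ['Prepare', 'Prevent', 'Delivery']):
--             categories['Delivery_Prep'].append(target)
--         elif any(word in target for word in ['Hemorrhage', 'Amniotic', 'Pelvis']):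
--             categories['Complications'].append(target)
--         elif any(word in target for word in ['Multiple', 'Any', 'Abnormal']):
--             categories['Composite'].append(target)
--         else:
--             # Default category
--             categories['Patient_Condition'].append(target)
--
--     return categories
-- ===== SOURCE B (Python) =====
-- def get_target_categories(target_list):
--     """
--     Categorize targets into different medical categories.
--
--     Parameters:
--     target_list (list): List of target column names
--
--     Returns:
--     dict: Categorized targets
--     """
--     rules = [
--         ('CTG_Assessment', ['CTG']),
--         ('Patient_Condition', ['Patient', 'Stable', 'Pain', 'Fever']),
--         ('Labor_Progress', ['Contractions', 'Guidance', 'Multipara', 'Position']),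
--         ('Monitoring', ['Monitor', 'Report', 'Notify', 'Reassess']),
--         ('Resuscitation', ['Resuscitation']),
--         ('Delivery_Prep', ['Prepare', 'Prevent', 'Delivery']),
--         ('Complications', ['Hemorrhage', 'Amniotic', 'Pelvis']),
--         ('Composite', ['Multiple', 'Any', 'Abnormal']),
--     ]
--
--     def classify(target):
--         for name, words in rules:
--             if any(word in target for word in words):
--                 return name
--         return 'Patient_Condition'
--
--     pairs = [(t, classify(t)) for t in target_list]
--     return {name: [t for t, c in pairs if c == name] for name, _ in rules}
-- ===== Notes on version B (the rewrite author's own statement) =====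
-- stated objective: simpler
-- what changed: Replaces the eight-branch if-elif chain that appends into a mutable dict with a declarative rule table (category, keywords) plus a classify scan, building the result as a dict comprehension of per-category filters instead of per-target appends.
import Mathlib
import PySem

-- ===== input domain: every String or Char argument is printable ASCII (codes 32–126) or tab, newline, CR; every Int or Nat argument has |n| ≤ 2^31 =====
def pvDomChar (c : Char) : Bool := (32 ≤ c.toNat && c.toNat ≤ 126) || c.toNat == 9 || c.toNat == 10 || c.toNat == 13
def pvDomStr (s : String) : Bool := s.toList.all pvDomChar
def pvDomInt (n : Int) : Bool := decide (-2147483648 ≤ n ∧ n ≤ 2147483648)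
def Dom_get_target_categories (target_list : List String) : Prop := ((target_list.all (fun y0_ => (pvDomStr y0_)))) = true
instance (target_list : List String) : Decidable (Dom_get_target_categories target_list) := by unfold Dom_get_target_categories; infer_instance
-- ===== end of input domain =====

-- B replaces A's eight-branch if-elif chain appending into a mutable dict by a declarative
-- rule table plus a classify scan, building the result as per-category filters (simpler).

-- ===== PORT A =====
def get_target_categories (target_list : List String) : List (String × List String) :=
  (target_list.foldl (fun categories target =>
      if PySem.Str.isIn "CTG" target then
        categories.modify "CTG_Assessment" [] (· ++ [target])
      else if ["Patient", "Stable", "Pain", "Fever"].any (fun word => PySem.Str.isIn word target) then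
        categories.modify "Patient_Condition" [] (· ++ [target])
      else if ["Contractions", "Guidance", "Multipara", "Position"].any (fun word => PySem.Str.isIn word target) then
        categories.modify "Labor_Progress" [] (· ++ [target])
      else if ["Monitor", "Report", "Notify", "Reassess"].any (fun word => PySem.Str.isIn word target) then
        categories.modify "Monitoring" [] (· ++ [target])
      else if PySem.Str.isIn "Resuscitation" target then
        categories.modify "Resuscitation" [] (· ++ [target])
      else if ["Prepare", "Prevent", "Delivery"].any (fun word => PySem.Str.isIn word target) then
        categories.modify "Delivery_Prep" [] (· ++ [target])
      else if ["Hemorrhage", "Amniotic", "Pelvis"].any (fun word => PySem.Str.isIn word target) then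
        categories.modify "Complications" [] (· ++ [target])
      else if ["Multiple", "Any", "Abnormal"].any (fun word => PySem.Str.isIn word target) then
        categories.modify "Composite" [] (· ++ [target])
      else
        categories.modify "Patient_Condition" [] (· ++ [target]))
    (PySem.Dict.mk [("CTG_Assessment", []), ("Patient_Condition", []), ("Labor_Progress", []),
      ("Monitoring", []), ("Resuscitation", []), ("Delivery_Prep", []), ("Complications", []),
      ("Composite", [])])).items

-- ===== PORT B =====
def pvRules : List (String × List String) :=
  [("CTG_Assessment", ["CTG"]),
   ("Patient_Condition", ["Patient", "Stable", "Pain", "Fever"]),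
   ("Labor_Progress", ["Contractions", "Guidance", "Multipara", "Position"]),
   ("Monitoring", ["Monitor", "Report", "Notify", "Reassess"]),
   ("Resuscitation", ["Resuscitation"]),
   ("Delivery_Prep", ["Prepare", "Prevent", "Delivery"]),
   ("Complications", ["Hemorrhage", "Amniotic", "Pelvis"]),
   ("Composite", ["Multiple", "Any", "Abnormal"])]

-- B's `classify`: first rule whose keyword list has a substring match, else the default.
def pvClassify (target : String) : String :=
  match pvRules.find? (fun r => r.2.any (fun word => PySem.Str.isIn word target)) with
  | some r => r.1
  | none => "Patient_Condition"

def get_target_categories_alt (target_list : List String) : List (String × List String) :=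
  let pairs := target_list.map (fun t => (t, pvClassify t))
  pvRules.map (fun r => (r.1, (pairs.filter (fun p => p.2 == r.1)).map (·.1)))

-- ===== PRECONDITION & SPEC =====
def Spec_get_target_categories (target_list : List String) (out : List (String × List String)) : Prop := out = get_target_categories_alt target_list
instance (target_list : List String) (out : List (String × List String)) : Decidable (Spec_get_target_categories target_list out) := by unfold Spec_get_target_categories; infer_instance

-- ===== CLAIM (what is proved, stated in full; the proofs are below) =====
def Claim_equal_get_target_categories : Prop := ∀ (target_list : List String), Dom_get_target_categories target_list → Spec_get_target_categories target_list (get_target_categories target_list)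

-- ===== LEMMAS AND PROOFS =====

-- A's if-elif chain performs exactly one modify, at the key B's classify picks.
theorem pv_step_eq (categories : PySem.Dict String (List String)) (target : String) :
    (if PySem.Str.isIn "CTG" target then
        categories.modify "CTG_Assessment" [] (· ++ [target])
      else if ["Patient", "Stable", "Pain", "Fever"].any (fun word => PySem.Str.isIn word target) then
        categories.modify "Patient_Condition" [] (· ++ [target])
      else if ["Contractions", "Guidance", "Multipara", "Position"].any (fun word => PySem.Str.isIn word target) then
        categories.modify "Labor_Progress" [] (· ++ [target])
      else if ["Monitor", "Report", "Notify", "Reassess"].any (fun word => PySem.Str.isIn word target) then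
        categories.modify "Monitoring" [] (· ++ [target])
      else if PySem.Str.isIn "Resuscitation" target then
        categories.modify "Resuscitation" [] (· ++ [target])
      else if ["Prepare", "Prevent", "Delivery"].any (fun word => PySem.Str.isIn word target) then
        categories.modify "Delivery_Prep" [] (· ++ [target])
      else if ["Hemorrhage", "Amniotic", "Pelvis"].any (fun word => PySem.Str.isIn word target) then
        categories.modify "Complications" [] (· ++ [target])
      else if ["Multiple", "Any", "Abnormal"].any (fun word => PySem.Str.isIn word target) then
        categories.modify "Composite" [] (· ++ [target])
      else
        categories.modify "Patient_Condition" [] (· ++ [target]))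
    = categories.modify (pvClassify target) [] (· ++ [target]) := by
  unfold pvClassify pvRules
  simp only [List.find?, List.any_cons, List.any_nil, Bool.or_false, PySem.Str.isIn_eq]
  split_ifs <;> simp only [Bool.not_eq_true] at * <;> simp only [*]

-- pvClassify always returns one of the eight category names.
theorem pv_classify_mem (t : String) :
    pvClassify t = "CTG_Assessment" ∨ pvClassify t = "Patient_Condition" ∨
    pvClassify t = "Labor_Progress" ∨ pvClassify t = "Monitoring" ∨
    pvClassify t = "Resuscitation" ∨ pvClassify t = "Delivery_Prep" ∨
    pvClassify t = "Complications" ∨ pvClassify t = "Composite" := by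
  unfold pvClassify
  cases hf : List.find? (fun r => r.2.any fun word => PySem.Str.isIn word t) pvRules with
  | none => simp
  | some r =>
    have hmem : r ∈ pvRules := List.mem_of_find?_eq_some hf
    simp only [pvRules, List.mem_cons, List.not_mem_nil, or_false] at hmem
    rcases hmem with h | h | h | h | h | h | h | h <;> subst h <;> simp

theorem pv_mod_1 (t : String) (l1 l2 l3 l4 l5 l6 l7 l8 : List String) :
    (PySem.Dict.mk [("CTG_Assessment", l1), ("Patient_Condition", l2), ("Labor_Progress", l3), ("Monitoring", l4), ("Resuscitation", l5), ("Delivery_Prep", l6), ("Complications", l7), ("Composite", l8)]).modify "CTG_Assessment" [] (· ++ [t]) = PySem.Dict.mk [("CTG_Assessment", l1 ++ [t]), ("Patient_Condition", l2), ("Labor_Progress", l3), ("Monitoring", l4), ("Resuscitation", l5), ("Delivery_Prep", l6), ("Complications", l7), ("Composite", l8)] := by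
  simp [PySem.Dict.modify, PySem.Dict.insert, PySem.Dict.getD, PySem.Dict.get?, PySem.Dict.contains]

theorem pv_mod_2 (t : String) (l1 l2 l3 l4 l5 l6 l7 l8 : List String) :
    (PySem.Dict.mk [("CTG_Assessment", l1), ("Patient_Condition", l2), ("Labor_Progress", l3), ("Monitoring", l4), ("Resuscitation", l5), ("Delivery_Prep", l6), ("Complications", l7), ("Composite", l8)]).modify "Patient_Condition" [] (· ++ [t]) = PySem.Dict.mk [("CTG_Assessment", l1), ("Patient_Condition", l2 ++ [t]), ("Labor_Progress", l3), ("Monitoring", l4), ("Resuscitation", l5), ("Delivery_Prep", l6), ("Complications", l7), ("Composite", l8)] := by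
  simp [PySem.Dict.modify, PySem.Dict.insert, PySem.Dict.getD, PySem.Dict.get?, PySem.Dict.contains]

theorem pv_mod_3 (t : String) (l1 l2 l3 l4 l5 l6 l7 l8 : List String) :
    (PySem.Dict.mk [("CTG_Assessment", l1), ("Patient_Condition", l2), ("Labor_Progress", l3), ("Monitoring", l4), ("Resuscitation", l5), ("Delivery_Prep", l6), ("Complications", l7), ("Composite", l8)]).modify "Labor_Progress" [] (· ++ [t]) = PySem.Dict.mk [("CTG_Assessment", l1), ("Patient_Condition", l2), ("Labor_Progress", l3 ++ [t]), ("Monitoring", l4), ("Resuscitation", l5), ("Delivery_Prep", l6), ("Complications", l7), ("Composite", l8)] := by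
  simp [PySem.Dict.modify, PySem.Dict.insert, PySem.Dict.getD, PySem.Dict.get?, PySem.Dict.contains]

theorem pv_mod_4 (t : String) (l1 l2 l3 l4 l5 l6 l7 l8 : List String) :
    (PySem.Dict.mk [("CTG_Assessment", l1), ("Patient_Condition", l2), ("Labor_Progress", l3), ("Monitoring", l4), ("Resuscitation", l5), ("Delivery_Prep", l6), ("Complications", l7), ("Composite", l8)]).modify "Monitoring" [] (· ++ [t]) = PySem.Dict.mk [("CTG_Assessment", l1), ("Patient_Condition", l2), ("Labor_Progress", l3), ("Monitoring", l4 ++ [t]), ("Resuscitation", l5), ("Delivery_Prep", l6), ("Complications", l7), ("Composite", l8)] := by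
  simp [PySem.Dict.modify, PySem.Dict.insert, PySem.Dict.getD, PySem.Dict.get?, PySem.Dict.contains]

theorem pv_mod_5 (t : String) (l1 l2 l3 l4 l5 l6 l7 l8 : List String) :
    (PySem.Dict.mk [("CTG_Assessment", l1), ("Patient_Condition", l2), ("Labor_Progress", l3), ("Monitoring", l4), ("Resuscitation", l5), ("Delivery_Prep", l6), ("Complications", l7), ("Composite", l8)]).modify "Resuscitation" [] (· ++ [t]) = PySem.Dict.mk [("CTG_Assessment", l1), ("Patient_Condition", l2), ("Labor_Progress", l3), ("Monitoring", l4), ("Resuscitation", l5 ++ [t]), ("Delivery_Prep", l6), ("Complications", l7), ("Composite", l8)] := by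
  simp [PySem.Dict.modify, PySem.Dict.insert, PySem.Dict.getD, PySem.Dict.get?, PySem.Dict.contains]

theorem pv_mod_6 (t : String) (l1 l2 l3 l4 l5 l6 l7 l8 : List String) :
    (PySem.Dict.mk [("CTG_Assessment", l1), ("Patient_Condition", l2), ("Labor_Progress", l3), ("Monitoring", l4), ("Resuscitation", l5), ("Delivery_Prep", l6), ("Complications", l7), ("Composite", l8)]).modify "Delivery_Prep" [] (· ++ [t]) = PySem.Dict.mk [("CTG_Assessment", l1), ("Patient_Condition", l2), ("Labor_Progress", l3), ("Monitoring", l4), ("Resuscitation", l5), ("Delivery_Prep", l6 ++ [t]), ("Complications", l7), ("Composite", l8)] := by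
  simp [PySem.Dict.modify, PySem.Dict.insert, PySem.Dict.getD, PySem.Dict.get?, PySem.Dict.contains]

theorem pv_mod_7 (t : String) (l1 l2 l3 l4 l5 l6 l7 l8 : List String) :
    (PySem.Dict.mk [("CTG_Assessment", l1), ("Patient_Condition", l2), ("Labor_Progress", l3), ("Monitoring", l4), ("Resuscitation", l5), ("Delivery_Prep", l6), ("Complications", l7), ("Composite", l8)]).modify "Complications" [] (· ++ [t]) = PySem.Dict.mk [("CTG_Assessment", l1), ("Patient_Condition", l2), ("Labor_Progress", l3), ("Monitoring", l4), ("Resuscitation", l5), ("Delivery_Prep", l6), ("Complications", l7 ++ [t]), ("Composite", l8)] := by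
  simp [PySem.Dict.modify, PySem.Dict.insert, PySem.Dict.getD, PySem.Dict.get?, PySem.Dict.contains]

theorem pv_mod_8 (t : String) (l1 l2 l3 l4 l5 l6 l7 l8 : List String) :
    (PySem.Dict.mk [("CTG_Assessment", l1), ("Patient_Condition", l2), ("Labor_Progress", l3), ("Monitoring", l4), ("Resuscitation", l5), ("Delivery_Prep", l6), ("Complications", l7), ("Composite", l8)]).modify "Composite" [] (· ++ [t]) = PySem.Dict.mk [("CTG_Assessment", l1), ("Patient_Condition", l2), ("Labor_Progress", l3), ("Monitoring", l4), ("Resuscitation", l5), ("Delivery_Prep", l6), ("Complications", l7), ("Composite", l8 ++ [t])] := by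
  simp [PySem.Dict.modify, PySem.Dict.insert, PySem.Dict.getD, PySem.Dict.get?, PySem.Dict.contains]

-- Loop invariant: the classify-and-append fold over the eight-key dict keeps the key order
-- and accumulates, per key, exactly the targets classified to that key.
theorem pv_loop_inv (ts : List String) (l1 l2 l3 l4 l5 l6 l7 l8 : List String) :
    ts.foldl (fun categories target => categories.modify (pvClassify target) [] (· ++ [target]))
      (PySem.Dict.mk [("CTG_Assessment", l1), ("Patient_Condition", l2), ("Labor_Progress", l3),
        ("Monitoring", l4), ("Resuscitation", l5), ("Delivery_Prep", l6), ("Complications", l7),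
        ("Composite", l8)])
    = PySem.Dict.mk
        [("CTG_Assessment", l1 ++ ts.filter (fun t => pvClassify t == "CTG_Assessment")),
         ("Patient_Condition", l2 ++ ts.filter (fun t => pvClassify t == "Patient_Condition")),
         ("Labor_Progress", l3 ++ ts.filter (fun t => pvClassify t == "Labor_Progress")),
         ("Monitoring", l4 ++ ts.filter (fun t => pvClassify t == "Monitoring")),
         ("Resuscitation", l5 ++ ts.filter (fun t => pvClassify t == "Resuscitation")),
         ("Delivery_Prep", l6 ++ ts.filter (fun t => pvClassify t == "Delivery_Prep")),
         ("Complications", l7 ++ ts.filter (fun t => pvClassify t == "Complications")),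
         ("Composite", l8 ++ ts.filter (fun t => pvClassify t == "Composite"))] := by
  induction ts generalizing l1 l2 l3 l4 l5 l6 l7 l8 with
  | nil => simp
  | cons t ts ih =>
    rcases pv_classify_mem t with h | h | h | h | h | h | h | h <;>
      rw [List.foldl_cons, h] <;>
      simp only [pv_mod_1, pv_mod_2, pv_mod_3, pv_mod_4, pv_mod_5, pv_mod_6, pv_mod_7, pv_mod_8] <;>
      rw [ih] <;>
      simp [h]

-- ===== VERDICT (by name: the statement is the Claim_ definition above) =====
theorem get_target_categories_spec : Claim_equal_get_target_categories := by
  intro ts _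
  show _ = _
  rw [get_target_categories]
  simp only [pv_step_eq]
  rw [pv_loop_inv]
  simp [get_target_categories_alt, pvRules, List.filter_map, Function.comp_def]
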